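-- pv_equiv track=rewrite | github.com/JuanBernaal/universidad | I Semester/Introducción a la programación/python/tipoTarea6.py | obtenerCostoTextoWhile
-- ===== SOURCE A (Python) =====
-- def obtenerCostoTextoWhile(cad, d):
--     ans, i = 0, 0
--     while i < len(cad):
--         for j in d:
--             if j == cad[i]:
--                 ans += d[j]
--         i += 1
--     return ans
-- ===== SOURCE B (Python) =====
-- def obtenerCostoTextoWhile(cad, d):
--     cnt = {}
--     for ch in cad:
--         cnt[ch] = cnt.get(ch, 0) + 1
--     ans = 0
--     for j, v in d.items():
--         ans += cnt.get(j, 0) * v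
--     return ans
-- ===== Notes on version B (the rewrite author's own statement) =====
-- stated objective: faster
-- what changed: B builds a character-frequency table of cad in one pass and then iterates over the dictionary once, multiplying each key's count by its value, instead of scanning every dictionary key for each character of cad.
import Mathlib
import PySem

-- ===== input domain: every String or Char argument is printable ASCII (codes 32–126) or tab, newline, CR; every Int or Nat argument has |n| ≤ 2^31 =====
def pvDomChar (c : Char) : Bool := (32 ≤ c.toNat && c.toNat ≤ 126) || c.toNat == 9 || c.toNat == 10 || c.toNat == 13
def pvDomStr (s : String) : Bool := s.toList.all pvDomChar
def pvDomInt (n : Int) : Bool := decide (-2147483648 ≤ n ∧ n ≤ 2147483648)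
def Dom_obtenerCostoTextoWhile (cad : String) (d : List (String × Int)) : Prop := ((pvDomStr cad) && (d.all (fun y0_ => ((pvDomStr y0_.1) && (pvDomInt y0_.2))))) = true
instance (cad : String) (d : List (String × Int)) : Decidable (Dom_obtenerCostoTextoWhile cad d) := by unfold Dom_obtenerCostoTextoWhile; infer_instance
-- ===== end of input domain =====

-- B replaces the nested scan (for every character, scan all dict keys) by one
-- frequency table of cad and a single pass over the dict (objective: faster, asymptotic).

-- ===== PORT A =====
-- while i < len(cad): for j in d: if j == cad[i]: ans += d[j]; the dict lookup d[j]
-- is a first-match lookup on the association list (PySem.Dict).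
def obtenerCostoTextoWhile (cad : String) (d : List (String × Int)) : Int :=
  cad.toList.foldl (fun ans c =>
    d.foldl (fun a p =>
      if p.1 == String.singleton c then a + (PySem.Dict.mk d).getD p.1 0 else a) ans) 0

-- ===== PORT B =====
-- cnt[ch] = cnt.get(ch, 0) + 1 over cad, then ans += cnt.get(j, 0) * v over d.items().
def obtenerCostoTextoWhile_alt (cad : String) (d : List (String × Int)) : Int :=
  let cnt : PySem.Dict String Int :=
    cad.toList.foldl
      (fun m c => m.insert (String.singleton c) (m.getD (String.singleton c) 0 + 1))
      PySem.Dict.empty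
  d.foldl (fun ans p => ans + cnt.getD p.1 0 * p.2) 0

-- ===== PRECONDITION & SPEC =====
-- Pre_ excludes association lists with duplicate keys: they do not represent any
-- Python dict (dict keys are unique), so no Python input is excluded.
def Pre_obtenerCostoTextoWhile (_cad : String) (d : List (String × Int)) : Prop :=
  (d.map Prod.fst).Nodup
instance (cad : String) (d : List (String × Int)) : Decidable (Pre_obtenerCostoTextoWhile cad d) := by unfold Pre_obtenerCostoTextoWhile; infer_instance

def pvWitness_obtenerCostoTextoWhile : String × (List (String × Int)) :=
  ("abcab", [("a", 2), ("b", -3), ("xy", 7)])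

def Spec_obtenerCostoTextoWhile (cad : String) (d : List (String × Int)) (out : Int) : Prop := out = obtenerCostoTextoWhile_alt cad d
instance (cad : String) (d : List (String × Int)) (out : Int) : Decidable (Spec_obtenerCostoTextoWhile cad d out) := by unfold Spec_obtenerCostoTextoWhile; infer_instance

-- ===== CLAIM (what is proved, stated in full; the proofs are below) =====
def Claim_equal_obtenerCostoTextoWhile : Prop := ∀ (cad : String) (d : List (String × Int)), Dom_obtenerCostoTextoWhile cad d → Pre_obtenerCostoTextoWhile cad d → Spec_obtenerCostoTextoWhile cad d (obtenerCostoTextoWhile cad d)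

-- ===== LEMMAS AND PROOFS =====

-- folding "add f x" is adding the sum of the mapped list
theorem pv_foldl_add_sum {α : Type} (f : α → Int) (l : List α) (a : Int) :
    l.foldl (fun acc x => acc + f x) a = a + (l.map f).sum := by
  induction l generalizing a with
  | nil => simp
  | cons x xs ih => simp [List.foldl_cons, ih, add_assoc]

-- inner loop of A as a sum (after replacing the dict lookup by the pair's own value)
theorem pv_inner_sum (d : List (String × Int)) (s : String) (a : Int) :
    d.foldl (fun acc p => if p.1 == s then acc + p.2 else acc) a
      = a + (d.map (fun p => if p.1 = s then p.2 else 0)).sum := by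
  induction d generalizing a with
  | nil => simp
  | cons p ps ih =>
    simp only [List.foldl_cons, List.map_cons, List.sum_cons, ih]
    by_cases h : p.1 = s <;> simp [h, add_assoc]

-- on a nodup-key list the first-match lookup of a member key returns that pair's value
theorem pv_getD_mem (d : List (String × Int)) (hnd : (d.map Prod.fst).Nodup)
    {p : String × Int} (hp : p ∈ d) : (PySem.Dict.mk d).getD p.1 0 = p.2 := by
  exact PySem.Dict.getD_of_mem_items (d := PySem.Dict.mk d) (by simpa using hp)
    (by simpa [PySem.Dict.keys] using hnd) 0

-- counting a character via the mapped singleton list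
theorem pv_count_sum (L : List Char) (k : String) (v : Int) :
    (L.map (fun c => if k = String.singleton c then v else 0)).sum
      = ((L.map String.singleton).count k : Int) * v := by
  induction L with
  | nil => simp
  | cons c cs ih =>
    simp only [List.map_cons, List.sum_cons, List.count_cons, ih]
    by_cases h : k = String.singleton c
    · simp [h, add_mul, add_comm]
    · simp [h]
      left
      intro hh
      exact h hh.symm

-- swap the double sum
theorem pv_sum_comm {α β : Type} (L : List α) (d : List β) (f : α → β → Int) :
    (L.map (fun c => (d.map (fun p => f c p)).sum)).sum
      = (d.map (fun p => (L.map (fun c => f c p)).sum)).sum := by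
  induction L with
  | nil => simp
  | cons c cs ih =>
    simp only [List.map_cons, List.sum_cons, ih]
    rw [← List.sum_map_add]

-- ===== VERDICT (by name: the statement is the Claim_ definition above) =====
theorem obtenerCostoTextoWhile_spec : Claim_equal_obtenerCostoTextoWhile := by
  intro cad d _ hnd
  unfold Spec_obtenerCostoTextoWhile obtenerCostoTextoWhile obtenerCostoTextoWhile_alt
  -- B's counter equals PySem.Dict.counter of the singleton-mapped char list
  have hcnt : cad.toList.foldl
      (fun m c => m.insert (String.singleton c) (m.getD (String.singleton c) 0 + 1))
      PySem.Dict.empty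
      = PySem.Dict.counter (cad.toList.map String.singleton) := by
    rw [← PySem.Dict.foldl_insert_getD_add_one_eq_counter, List.foldl_map]
  simp only [hcnt]
  -- rewrite A's inner loop: the dict lookup is the pair's own value
  have hA : ∀ ans : Int, ∀ c : Char,
      d.foldl (fun a p => if p.1 == String.singleton c then a + (PySem.Dict.mk d).getD p.1 0 else a) ans
        = ans + (d.map (fun p => if p.1 = String.singleton c then p.2 else 0)).sum := by
    intro ans c
    rw [← pv_inner_sum d (String.singleton c) ans]
    apply PySem.List.foldl_congr_mem
    intro a p hp
    simp [pv_getD_mem d hnd hp]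
  calc cad.toList.foldl (fun ans c =>
          d.foldl (fun a p => if p.1 == String.singleton c then a + (PySem.Dict.mk d).getD p.1 0 else a) ans) 0
      = cad.toList.foldl (fun ans c =>
          ans + (d.map (fun p => if p.1 = String.singleton c then p.2 else 0)).sum) 0 := by
        apply PySem.List.foldl_congr_mem; intro a c _; exact hA a c
    _ = 0 + (cad.toList.map (fun c => (d.map (fun p => if p.1 = String.singleton c then p.2 else 0)).sum)).sum := by
        exact pv_foldl_add_sum _ _ 0
    _ = (d.map (fun p => (cad.toList.map (fun c => if p.1 = String.singleton c then p.2 else 0)).sum)).sum := by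
        rw [zero_add, pv_sum_comm]
    _ = (d.map (fun p => ((cad.toList.map String.singleton).count p.1 : Int) * p.2)).sum := by
        exact congrArg List.sum (List.map_congr_left fun p _ => pv_count_sum cad.toList p.1 p.2)
    _ = d.foldl (fun ans p => ans + (PySem.Dict.counter (cad.toList.map String.singleton)).getD p.1 0 * p.2) 0 := by
        rw [pv_foldl_add_sum (fun p => (PySem.Dict.counter (cad.toList.map String.singleton)).getD p.1 0 * p.2) d 0, zero_add]
        exact congrArg List.sum (List.map_congr_left fun p _ => by rw [PySem.Dict.getD_counter])
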